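-- pv_equiv track=rewrite | github.com/DatabrainsDz/BI4SS-ML | problem_two/database.py | get_dic
-- ===== SOURCE A (Python) =====
-- def get_dic(values):
--     dic = {}
--     for i in values:
--         for j in range(1,len(i)):
--
--             if i[0] not in dic.keys():
--                 dic[i[0]] = []
--             if str(i[j]) !='nan':
--                 if i[j] not in dic[i[0]]:
--                     dic[i[0]].append(i[j])
--     return dic
-- ===== SOURCE B (Python) =====
-- def get_dic(values):
--     # pass 1: group ALL non-'nan' values (duplicates kept) per first element
--     groups = {}
--     for i in values:
--         if len(i) >= 2:
--             groups.setdefault(i[0], []).extend(v for v in i[1:] if str(v) != 'nan')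
--     # pass 2: deduplicate each group in first-occurrence order
--     dic = {}
--     for k, vs in groups.items():
--         out = []
--         for x in vs:
--             if x not in out:
--                 out.append(x)
--         dic[k] = out
--     return dic
-- ===== Notes on version B (the rewrite author's own statement) =====
-- stated objective: alternative
-- what changed: A interleaves key-creation, nan-filtering and per-element membership dedup inside one nested loop; B does two separate passes: first group all non-'nan' values per key (duplicates kept, setdefault+extend over a slice), then deduplicate each group list in order.
import Mathlib
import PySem

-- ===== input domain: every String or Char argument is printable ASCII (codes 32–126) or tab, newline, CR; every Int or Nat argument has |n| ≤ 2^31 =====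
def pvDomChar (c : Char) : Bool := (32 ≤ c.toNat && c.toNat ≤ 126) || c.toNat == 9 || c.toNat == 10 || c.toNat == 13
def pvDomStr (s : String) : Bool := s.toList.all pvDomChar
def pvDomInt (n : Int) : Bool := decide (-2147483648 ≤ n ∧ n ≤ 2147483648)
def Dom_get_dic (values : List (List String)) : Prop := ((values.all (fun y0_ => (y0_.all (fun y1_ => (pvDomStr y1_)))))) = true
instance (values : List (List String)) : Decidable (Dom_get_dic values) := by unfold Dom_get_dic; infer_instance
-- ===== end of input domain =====

-- B replaces A's single nested loop (key-creation + nan test + membership dedup per element)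
-- by two passes: group all non-'nan' values per key, then dedup each group list in order (objective: alternative decomposition).

-- ===== PORT A =====
-- body of A's inner loop: ensure key, then append i[j] if non-'nan' and not yet present
def stepA (k : String) (d : PySem.Dict String (List String)) (v : String) :
    PySem.Dict String (List String) :=
  let d' := if d.contains k then d else d.insert k ([] : List String)
  if v ≠ "nan" then (if v ∈ d'.getD k [] then d' else d'.modify k [] (· ++ [v])) else d'

def get_dic (values : List (List String)) : List (String × List String) :=
  (values.foldl (fun d i =>
      (PySem.List.pyRange 1 (PySem.List.len i)).foldl
        (fun d j => stepA (PySem.List.pyGetD i 0 "") d (PySem.List.pyGetD i j "")) d)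
    PySem.Dict.empty).items

-- ===== PORT B =====
-- pass 1 of Source B: groups.setdefault(i[0], []).extend(v for v in i[1:] if str(v) != 'nan')
def groupRowB (g : PySem.Dict String (List String)) (i : List String) :
    PySem.Dict String (List String) :=
  if 2 ≤ PySem.List.len i then
    g.modify (PySem.List.pyGetD i 0 "") []
      (· ++ (PySem.List.slice i (some 1)).filter (fun v => decide (v ≠ "nan")))
  else g

-- pass 2 of Source B: the in-order membership-dedup loop is exactly PySem.Set.ofList (= foldl Set.add [])
def get_dic_alt (values : List (List String)) : List (String × List String) :=
  ((values.foldl groupRowB PySem.Dict.empty).items.foldl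
      (fun d p => d.insert p.1 (PySem.Set.ofList p.2)) PySem.Dict.empty).items

-- ===== PRECONDITION & SPEC =====
def Spec_get_dic (values : List (List String)) (out : List (String × List String)) : Prop := out = get_dic_alt values
instance (values : List (List String)) (out : List (String × List String)) : Decidable (Spec_get_dic values out) := by unfold Spec_get_dic; infer_instance

-- ===== CLAIM (what is proved, stated in full; the proofs are below) =====
def Claim_equal_get_dic : Prop := ∀ (values : List (List String)), Dom_get_dic values → Spec_get_dic values (get_dic values)

-- ===== LEMMAS AND PROOFS =====

-- the value map between B's grouped dict and A's deduplicated dict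
def fDedup (p : String × List String) : String × List String := (p.1, PySem.Set.ofList p.2)

lemma contains_map_fDedup (l : List (String × List String)) (k : String) :
    (PySem.Dict.mk (l.map fDedup)).contains k = (PySem.Dict.mk l).contains k := by
  simp only [PySem.Dict.contains, List.any_map]
  congr 1

lemma keys_map_fDedup (l : List (String × List String)) :
    (PySem.Dict.mk (l.map fDedup)).keys = (PySem.Dict.mk l).keys := by
  simp [PySem.Dict.keys, fDedup, Function.comp]

lemma get?_map_fDedup (l : List (String × List String)) (k : String) :
    (PySem.Dict.mk (l.map fDedup)).get? k = ((PySem.Dict.mk l).get? k).map PySem.Set.ofList := by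
  simp only [PySem.Dict.get?, List.find?_map]
  have h1 : ((fun p : String × List String => p.1 == k) ∘ fDedup) = (fun p => p.1 == k) := by
    funext p; simp [fDedup]
  rw [h1]
  cases List.find? (fun p => p.1 == k) l <;> simp [fDedup]

lemma getD_map_fDedup (l : List (String × List String)) (k : String) :
    (PySem.Dict.mk (l.map fDedup)).getD k [] = PySem.Set.ofList ((PySem.Dict.mk l).getD k []) := by
  rw [PySem.Dict.getD_eq_get?_getD, PySem.Dict.getD_eq_get?_getD, get?_map_fDedup]
  cases (PySem.Dict.mk l).get? k <;> simp [PySem.Set.ofList, PySem.Set.empty]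

lemma items_insert_map_fDedup (l : List (String × List String)) (k : String) (v : List String) :
    ((PySem.Dict.mk (l.map fDedup)).insert k (PySem.Set.ofList v)).items
      = (((PySem.Dict.mk l).insert k v).items).map fDedup := by
  rw [PySem.Dict.items_insert, PySem.Dict.items_insert, contains_map_fDedup]
  by_cases h : (PySem.Dict.mk l).contains k = true
  · simp only [h, if_pos]
    rw [List.map_map, List.map_map]
    apply List.map_congr_left
    intro p _
    by_cases hp : p.1 = k <;> simp [fDedup, hp]
  · simp [h, fDedup]

lemma insert_getD_self' (d : PySem.Dict String (List String)) (k : String)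
    (hc : d.contains k = true) (hnd : d.keys.Nodup) :
    d.insert k (d.getD k []) = d := by
  apply PySem.Dict.ext
  rw [PySem.Dict.items_insert]
  simp only [hc, if_true]
  have : ∀ p ∈ d.items, (if (p.1 == k) = true then (k, d.getD k []) else p) = id p := by
    intro p hp
    by_cases hpk : p.1 = k
    · have hmem : (k, p.2) ∈ d.items := by rwa [← hpk]
      have hgd := PySem.Dict.getD_of_mem_items (d := d) (d0 := ([] : List String)) hmem hnd
      have hbeq : (p.1 == k) = true := by simp [hpk]
      rw [if_pos hbeq, hgd, ← hpk]
      rfl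
    · simp [hpk]
  rw [List.map_congr_left this, List.map_id]

-- stepA with the key already present drops its ensure-branch
lemma stepA_of_contains (k : String) (d : PySem.Dict String (List String)) (v : String)
    (hc : d.contains k = true) :
    stepA k d v = if v ≠ "nan" then (if v ∈ d.getD k [] then d else d.modify k [] (· ++ [v])) else d := by
  simp [stepA, hc]

-- A's inner loop over a row tail = one insert of the Set.update of the filtered tail
lemma rowA_contains (k : String) :
    ∀ (t : List String) (d : PySem.Dict String (List String)),
      d.contains k = true → d.keys.Nodup →
      t.foldl (stepA k) d
        = d.insert k (PySem.Set.update (d.getD k []) (t.filter (fun v => decide (v ≠ "nan")))) := by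
  intro t
  induction t with
  | nil =>
    intro d hc hnd
    simp [PySem.Set.update, insert_getD_self' d k hc hnd]
  | cons v rest ih =>
    intro d hc hnd
    rw [List.foldl_cons, stepA_of_contains k d v hc]
    by_cases hv : v = "nan"
    · simp only [hv]
      simpa using ih d hc hnd
    · by_cases hm : v ∈ d.getD k []
      · rw [if_pos (by simpa using hv), if_pos hm, ih d hc hnd]
        have : PySem.Set.add (d.getD k []) v = d.getD k [] := PySem.Set.add_of_mem hm
        simp [hv, PySem.Set.update, this]
      · rw [if_pos (by simpa using hv), if_neg hm]
        have hmod : d.modify k [] (· ++ [v]) = d.insert k (d.getD k [] ++ [v]) := rfl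
        rw [hmod, ih _ (PySem.Dict.contains_insert_self d k _)
              (PySem.Dict.nodup_keys_insert d k _ hnd)]
        rw [PySem.Dict.insert_insert_self, PySem.Dict.getD_insert_self]
        have : PySem.Set.add (d.getD k []) v = d.getD k [] ++ [v] := PySem.Set.add_of_not_mem hm
        simp [hv, PySem.Set.update, this]

-- A's inner loop over a NONEMPTY row tail, any starting dict
lemma rowA_full (k : String) (t : List String) (d : PySem.Dict String (List String))
    (ht : t ≠ []) (hnd : d.keys.Nodup) :
    t.foldl (stepA k) d
      = d.insert k (PySem.Set.update (d.getD k []) (t.filter (fun v => decide (v ≠ "nan")))) := by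
  by_cases hc : d.contains k = true
  · exact rowA_contains k t d hc hnd
  · obtain ⟨v, rest, rfl⟩ := List.exists_cons_of_ne_nil ht
    have hins : (d.insert k ([] : List String)).contains k = true :=
      PySem.Dict.contains_insert_self d k _
    have hstep : stepA k d v = stepA k (d.insert k ([] : List String)) v := by
      simp only [stepA, hc]
      simp [hins]
    rw [List.foldl_cons, hstep, ← List.foldl_cons]
    rw [rowA_contains k (v :: rest) _ hins (PySem.Dict.nodup_keys_insert d k _ hnd)]
    rw [PySem.Dict.insert_insert_self, PySem.Dict.getD_insert_self,
        PySem.Dict.getD_of_not_contains d [] (by simpa using hc)]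

lemma ofList_append (a b : List String) :
    PySem.Set.ofList (a ++ b) = PySem.Set.update (PySem.Set.ofList a) b := by
  simp [PySem.Set.ofList, PySem.Set.update, List.foldl_append]

-- the main invariant: A's running dict is B's running group dict with ofList applied to every value
lemma main_inv :
    ∀ (values : List (List String)) (dB dA : PySem.Dict String (List String)),
      dA.items = dB.items.map fDedup → dB.keys.Nodup →
      (values.foldl (fun d i =>
          (PySem.List.pyRange 1 (PySem.List.len i)).foldl
            (fun d j => stepA (PySem.List.pyGetD i 0 "") d (PySem.List.pyGetD i j "")) d) dA).items
        = (values.foldl groupRowB dB).items.map fDedup := by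
  intro values
  induction values with
  | nil => intro dB dA h _; simpa using h
  | cons i rest ih =>
    intro dB dA h hnd
    by_cases hlen : 2 ≤ PySem.List.len i
    · -- row with at least two entries: head k, nonempty tail t
      obtain ⟨k, t, rfl⟩ : ∃ k t, i = k :: t := by
        cases i with
        | nil => simp [PySem.List.len] at hlen
        | cons a b => exact ⟨a, b, rfl⟩
      have ht : t ≠ [] := by
        cases t with
        | nil => simp [PySem.List.len] at hlen
        | cons _ _ => simp
      have hk0 : PySem.List.pyGetD (k :: t) 0 "" = k := by
        rw [PySem.List.pyGetD_of_nonneg _ _ (by norm_num)]; rfl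
      have hdropA :
          (PySem.List.pyRange 1 (PySem.List.len (k :: t))).foldl
              (fun d j => stepA (PySem.List.pyGetD (k :: t) 0 "") d (PySem.List.pyGetD (k :: t) j "")) dA
            = t.foldl (stepA k) dA := by
        rw [hk0]
        simpa using PySem.List.foldl_pyRange_pyGetD (k :: t) "" (stepA k) dA (a := 1) (by norm_num)
      have hndA : dA.keys.Nodup := by
        have : dA.keys = dB.keys := by
          have := keys_map_fDedup dB.items
          simpa [PySem.Dict.keys, h] using this
        rwa [this]
      have hAeq : dA = PySem.Dict.mk (dB.items.map fDedup) := by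
        cases dA; simpa using h
      -- A's row
      rw [List.foldl_cons, List.foldl_cons, hdropA,
          rowA_full k t dA ht hndA]
      -- B's row
      have hBrow : groupRowB dB (k :: t)
          = dB.insert k (dB.getD k [] ++ t.filter (fun v => decide (v ≠ "nan"))) := by
        unfold groupRowB
        rw [if_pos hlen, hk0]
        have hsl : PySem.List.slice (k :: t) (some 1) = t := by
          rw [PySem.List.slice_from _ (by norm_num)]; rfl
        rw [hsl]; rfl
      rw [hBrow]
      -- relate the two inserted dicts and close with the IH
      have hval : PySem.Set.update (dA.getD k []) (t.filter (fun v => decide (v ≠ "nan")))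
          = PySem.Set.ofList (dB.getD k [] ++ t.filter (fun v => decide (v ≠ "nan"))) := by
        rw [ofList_append, hAeq, getD_map_fDedup]
      rw [hval, hAeq]
      refine ih _ _ ?_ (PySem.Dict.nodup_keys_insert dB k _ hnd)
      have := items_insert_map_fDedup dB.items k
          (dB.getD k [] ++ t.filter (fun v => decide (v ≠ "nan")))
      simpa using this
    · -- short row: both sides leave their dict unchanged
      have hA : PySem.List.pyRange 1 (PySem.List.len i) = [] := by
        apply PySem.List.pyRange_one_eq_nil
        simp only [PySem.List.len] at hlen ⊢
        omega
      have hB : groupRowB dB i = dB := by unfold groupRowB; rw [if_neg hlen]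
      rw [List.foldl_cons, List.foldl_cons, hA, hB]
      simpa using ih dB dA h hnd

-- B's group dict keeps its keys Nodup
lemma nodup_keys_groups :
    ∀ (values : List (List String)) (g : PySem.Dict String (List String)),
      g.keys.Nodup → (values.foldl groupRowB g).keys.Nodup := by
  intro values
  induction values with
  | nil => intro g h; simpa using h
  | cons i rest ih =>
    intro g h
    rw [List.foldl_cons]
    apply ih
    unfold groupRowB
    by_cases hlen : 2 ≤ PySem.List.len i
    · rw [if_pos hlen]
      exact PySem.Dict.nodup_keys_insert g _ _ h
    · rwa [if_neg hlen]

-- ===== VERDICT (by name: the statement is the Claim_ definition above) =====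
theorem get_dic_spec : Claim_equal_get_dic := by
  intro values _
  unfold Spec_get_dic get_dic get_dic_alt
  have hnd : (values.foldl groupRowB PySem.Dict.empty).keys.Nodup :=
    nodup_keys_groups values PySem.Dict.empty (by simp [PySem.Dict.empty, PySem.Dict.keys])
  have hmain := main_inv values PySem.Dict.empty PySem.Dict.empty
      (by simp [PySem.Dict.empty]) (by simp [PySem.Dict.empty, PySem.Dict.keys])
  rw [hmain]
  have hfresh := PySem.Dict.items_foldl_insert_fresh
      (l := (values.foldl groupRowB PySem.Dict.empty).items)
      (k := fun p => p.1) (v := fun p => PySem.Set.ofList p.2)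
      (d := PySem.Dict.empty)
      (by intro a _; simp [PySem.Dict.empty, PySem.Dict.contains])
      (by simpa [PySem.Dict.keys] using hnd)
  rw [hfresh]
  simp [PySem.Dict.empty, fDedup]
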